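-- pv_equiv track=rewrite | github.com/seungho-jung/n_term_karatsuba | 3_way_toom_cook.py | toom_cook_recursive
-- ===== SOURCE A (Python) =====
-- def toom_cook_recursive(x, y, k):
--     # convert to string for easier manipulation of digits
--     x_str = str(x)
--     y_str = str(y)
--
--     # base case
--     if len(x_str) == 1 or len(y_str) == 1:
--         return int(x) * int(y)
--
--     # find the maximum length between x and y
--     n = max(len(x_str), len(y_str))
--
--     # pad zeros to make the length of x and y the same
--     if n % k != 0:
--         n += k - (n % k)
--     x_str = x_str.zfill(n)
--     y_str = y_str.zfill(n)
--
--     # split x and y into parts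
--     part_size = n // k
--     x_parts = [x_str[i*part_size:(i+1)*part_size] for i in range(k)]
--     y_parts = [y_str[i*part_size:(i+1)*part_size] for i in range(k)]
--
--     # calculate the intermediate values
--     a = [int(x_parts[i]) for i in range(k)]
--     b = [int(y_parts[i]) for i in range(k)]
--     m = k + 1
--     r = [0] * (2*k - 1)
--     for i in range(k):
--         for j in range(k):
--             r[i+j] += a[i] * b[j]
--     v = [0] * m
--     for i in range(m):
--         v[i] = sum(r[j] * pow(i, j) for j in range(2*k - 1))
--
--     # solve the system of linear equations to get the coefficients of the product polynomial
--     A = [[pow(i, j) for j in range(m)] for i in range(m)]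
--     coeffs = [0] * m
--     for i in range(m):
--         # Gaussian elimination
--         for j in range(i+1, m):
--             factor = A[j][i] // A[i][i]
--             for k in range(i, m):
--                 A[j][k] -= factor * A[i][k]
--             v[j] -= factor * v[i]
--         # back substitution
--         coeffs[m-1-i] = v[m-1-i] // A[m-1-i][m-1-i]
--         for j in range(i+1, m):
--             v[j] -= coeffs[m-1-i] * A[j][m-1-i]
--
--     # evaluate the product polynomial at x = 10^(part_size)
--     result = 0
--     base = 10**part_size
--     for i in range(m):
--         result += coeffs[i] * pow(base, i)
--
--     return result
-- ===== SOURCE B (Python) =====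
-- # Same Toom-Cook-style scheme, restructured throughout: ceiling-formula padding,
-- # take/drop chunking, direct Horner sampling of the two split polynomials (no
-- # convolution array), Vandermonde rows built by running products instead of pow,
-- # elimination by bulk row rebuilds with the coefficient list grown by prepending,
-- # and Horner recombination (objective: alternative, same cost).
--
-- def _chunks(s, count, part):
--     out = []
--     rest = s
--     for _ in range(count):
--         out.append(int(rest[:part]))
--         rest = rest[part:]
--     return out
--
-- def _horner(cs, t):
--     acc = 0
--     for c in reversed(cs):
--         acc = c + t * acc
--     return acc
--
-- def _pows(t, m):
--     out, p = [], 1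
--     for _ in range(m):
--         out.append(p)
--         p *= t
--     return out
--
-- def toom_cook_recursive(x, y, k):
--     xs, ys = str(x), str(y)
--     if len(xs) == 1 or len(ys) == 1:
--         return x * y
--     n = -(-max(len(xs), len(ys)) // k) * k   # round up to a multiple of k
--     part = n // k
--     a = _chunks(xs.zfill(n), k, part)
--     b = _chunks(ys.zfill(n), k, part)
--     m = k + 1
--     # evaluate the two halves at each sample point and multiply the samples
--     v = [_horner(a, i) * _horner(b, i) for i in range(m)]
--     A = [_pows(i, m) for i in range(m)]
--     coeffs = []
--     i = 0
--     while i < m: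
--         piv = A[i][i]
--         vi = v[i]
--         Ai = A[i]
--         # bulk elimination of the rows below i (each row is independent)
--         v = v[:i + 1] + [v[j] - (A[j][i] // piv) * vi for j in range(i + 1, m)]
--         A = A[:i + 1] + [row[:i] + [row[t] - (row[i] // piv) * Ai[t]
--                                     for t in range(i, m)]
--                          for row in A[i + 1:]]
--         p = m - 1 - i
--         c = v[p] // A[p][p]
--         coeffs = [c] + coeffs
--         v = v[:i + 1] + [v[j] - c * A[j][p] for j in range(i + 1, m)]
--         i += 1
--     return _horner(coeffs, 10 ** part)
-- ===== Notes on version B (the rewrite author's own statement) =====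
-- stated objective: alternative
-- what changed: Every phase is restructured: the padded length comes from a ceiling-division formula instead of the mod-adjust branch, splitting is recursive take/drop chunking instead of indexed slices, the convolution array and its i+j double loop are replaced by direct Horner evaluation of the two split polynomials at each sample point, Vandermonde rows are built by running products instead of pow, elimination rebuilds the rows below the pivot in bulk and grows the coefficient list by prepending instead of in-place element assignments into preallocated arrays, and recombination is Horner instead of a …
import Mathlib
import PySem

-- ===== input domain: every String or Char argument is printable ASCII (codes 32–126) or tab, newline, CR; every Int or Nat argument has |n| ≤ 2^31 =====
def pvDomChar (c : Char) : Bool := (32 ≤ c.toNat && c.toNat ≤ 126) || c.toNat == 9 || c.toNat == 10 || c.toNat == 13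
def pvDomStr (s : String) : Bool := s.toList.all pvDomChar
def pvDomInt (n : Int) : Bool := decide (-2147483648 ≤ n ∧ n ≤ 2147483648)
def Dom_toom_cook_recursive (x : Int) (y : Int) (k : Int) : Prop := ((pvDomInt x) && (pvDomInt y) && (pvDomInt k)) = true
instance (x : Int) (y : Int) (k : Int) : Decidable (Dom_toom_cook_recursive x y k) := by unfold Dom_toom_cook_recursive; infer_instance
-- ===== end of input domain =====

-- B restructures every phase of the same scheme: ceiling-formula padding, take/drop
-- chunking, direct Horner sampling of the two split polynomials (no convolution
-- array), Vandermonde rows by running products, elimination by bulk row rebuilds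
-- with the coefficient list grown by prepending, and Horner recombination
-- (objective: alternative, same cost).

-- ===== PORT A =====
-- Notes on exactness: range(k) / [0]*(2k-1) / range(m) with a possibly nonpositive
-- bound are empty in Python, exactly like `.toNat` (which clamps to 0) here.
-- int(part) is PySem.Int.ofChars?; its `.getD 0` arm (= ValueError) is excluded by Pre_.
-- Every list index A reads or assigns is in range on every executed iteration, so
-- `List.getD` / `List.set` are exact renderings of Python's indexing/assignment here.

def pvIntA (cs : List Char) : Int := (PySem.Int.ofChars? cs).getD 0

-- x_parts = [x_str[i*part_size:(i+1)*part_size] for i in range(k)]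
def pvPartsA (s : List Char) (kn : Nat) (ps : Int) : List (List Char) :=
  (List.range kn).map (fun (i : Nat) => PySem.List.slice s (some ((i : Int) * ps)) (some (((i : Int) + 1) * ps)))

-- r = [0]*(2k-1); for i in range(k): for j in range(k): r[i+j] += a[i]*b[j]
def pvConvA (kn len2 : Nat) (a b : List Int) : List Int :=
  (List.range kn).foldl (fun r i => (List.range kn).foldl
    (fun r j => r.set (i + j) (r.getD (i + j) 0 + a.getD i 0 * b.getD j 0)) r)
    (List.replicate len2 (0 : Int))

-- v = [0]*m; for i in range(m): v[i] = sum(r[j]*pow(i,j) for j in range(2k-1))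
def pvSampleA (mN len2 : Nat) (r : List Int) : List Int :=
  (List.range mN).foldl
    (fun v i => v.set i (((List.range len2).map (fun (j : Nat) => r.getD j 0 * (i : Int) ^ j)).sum))
    (List.replicate mN (0 : Int))

-- A = [[pow(i, j) for j in range(m)] for i in range(m)]
def pvVanderA (mN : Nat) : List (List Int) :=
  (List.range mN).map (fun (i : Nat) => (List.range mN).map (fun (j : Nat) => (i : Int) ^ j))

-- the Gaussian-elimination / back-substitution loop over i in range(m),
-- state = (A, v, coeffs); the inner `for k in range(i, m)` shadows the parameter k
-- in Python and k is not used again afterwards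
def pvGaussA (mN : Nat) (Am0 : List (List Int)) (v0 : List Int) :
    List (List Int) × List Int × List Int :=
  (List.range mN).foldl (fun st i =>
    let st2 := (List.range' (i + 1) (mN - (i + 1))).foldl (fun st2 j =>
      let Am := st2.1
      let v := st2.2
      let factor := PySem.Int.floordiv ((Am.getD j []).getD i 0) ((Am.getD i []).getD i 0)
      let Am := (List.range' i (mN - i)).foldl (fun Am t =>
        Am.set j ((Am.getD j []).set t
          ((Am.getD j []).getD t 0 - factor * (Am.getD i []).getD t 0))) Am
      (Am, v.set j (v.getD j 0 - factor * v.getD i 0))) ((st.1, st.2.1) : List (List Int) × List Int)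
    let p := mN - 1 - i
    let c := PySem.Int.floordiv (st2.2.getD p 0) ((st2.1.getD p []).getD p 0)
    (st2.1,
     (List.range' (i + 1) (mN - (i + 1))).foldl
       (fun v j => v.set j (v.getD j 0 - c * (st2.1.getD j []).getD p 0)) st2.2,
     st.2.2.set p c)) (Am0, v0, List.replicate mN (0 : Int))

-- result = 0; for i in range(m): result += coeffs[i] * pow(base, i)
def pvRecombA (mN : Nat) (coeffs : List Int) (base : Int) : Int :=
  (List.range mN).foldl (fun result i => result + coeffs.getD i 0 * base ^ i) 0

-- everything from the zfill padding on (n is the already rounded-up length)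
def pvMainA (x_str y_str : List Char) (k n : Int) : Int :=
  let xp := PySem.Chars.zfill x_str n
  let yp := PySem.Chars.zfill y_str n
  let part_size : Int := PySem.Int.floordiv n k
  let kn := k.toNat
  let a := (List.range kn).map (fun i => pvIntA ((pvPartsA xp kn part_size).getD i []))
  let b := (List.range kn).map (fun i => pvIntA ((pvPartsA yp kn part_size).getD i []))
  let mN := (k + 1).toNat
  let len2 := (2 * k - 1).toNat
  let v := pvSampleA mN len2 (pvConvA kn len2 a b)
  let coeffs := (pvGaussA mN (pvVanderA mN) v).2.2
  -- base = 10**part_size: part_size ≥ 1 whenever the result loop is nonempty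
  pvRecombA mN coeffs (10 ^ part_size.toNat)

def toom_cook_recursive (x : Int) (y : Int) (k : Int) : Int :=
  let x_str := PySem.Int.toChars x
  let y_str := PySem.Int.toChars y
  if x_str.length = 1 ∨ y_str.length = 1 then x * y
  else
    let n0 : Int := max (x_str.length : Int) (y_str.length : Int)
    let n : Int := if PySem.Int.mod n0 k ≠ 0 then n0 + (k - PySem.Int.mod n0 k) else n0
    pvMainA x_str y_str k n

-- ===== PORT B =====
-- same exactness notes as for A: clamped `.toNat` counts render Python's empty
-- ranges/replications, and `.getD` / `.take` / `.drop` are exact for the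
-- always-in-range indices and nonnegative slice bounds B uses.

-- _chunks: repeatedly int(rest[:part]) / rest = rest[part:], k times
def pvChunks (part : Int) : Nat → List Char → List Int
  | 0, _ => []
  | c + 1, rest =>
      (PySem.Int.ofChars? (PySem.List.slice rest none (some part))).getD 0 ::
        pvChunks part c (PySem.List.slice rest (some part) none)

-- _horner: acc = 0; for c in reversed(cs): acc = c + t * acc
def pvHorner (cs : List Int) (t : Int) : Int :=
  cs.foldr (fun c acc => c + t * acc) 0

-- _pows: out, p = [], 1; for _ in range(m): out.append(p); p *= t
def pvPows (t : Int) : Nat → Int → List Int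
  | 0, _ => []
  | m + 1, p => p :: pvPows t m (p * t)

-- the while-loop: i runs from mN - fuel up to mN - 1; bulk row rebuilds; the
-- coefficient found at step i is prepended to the accumulator
def pvElimB (mN : Nat) : Nat → List (List Int) × List Int → List Int → List Int
  | 0, _, acc => acc
  | fuel + 1, (Am, v), acc =>
      let i := mN - (fuel + 1)
      let piv := (Am.getD i []).getD i 0
      let vi := v.getD i 0
      let Ai := Am.getD i []
      let v1 := v.take (i + 1) ++ (List.range' (i + 1) (mN - (i + 1))).map
        (fun j => v.getD j 0 - PySem.Int.floordiv ((Am.getD j []).getD i 0) piv * vi)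
      let Am1 := Am.take (i + 1) ++ (Am.drop (i + 1)).map
        (fun row => row.take i ++ (List.range' i (mN - i)).map
          (fun t => row.getD t 0 - PySem.Int.floordiv (row.getD i 0) piv * Ai.getD t 0))
      let p := mN - 1 - i
      let c := PySem.Int.floordiv (v1.getD p 0) ((Am1.getD p []).getD p 0)
      let v2 := v1.take (i + 1) ++ (List.range' (i + 1) (mN - (i + 1))).map
        (fun j => v1.getD j 0 - c * (Am1.getD j []).getD p 0)
      pvElimB mN fuel (Am1, v2) (c :: acc)

def pvMainB (xs ys : List Char) (k n : Int) : Int :=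
  let part : Int := PySem.Int.floordiv n k
  let a := pvChunks part k.toNat (PySem.Chars.zfill xs n)
  let b := pvChunks part k.toNat (PySem.Chars.zfill ys n)
  let mN := (k + 1).toNat
  let v := (List.range mN).map (fun (i : Nat) => pvHorner a (i : Int) * pvHorner b (i : Int))
  let A0 := (List.range mN).map (fun (i : Nat) => pvPows (i : Int) mN 1)
  pvHorner (pvElimB mN mN (A0, v) []) (10 ^ part.toNat)

def toom_cook_recursive_alt (x : Int) (y : Int) (k : Int) : Int :=
  let xs := PySem.Int.toChars x
  let ys := PySem.Int.toChars y
  if xs.length = 1 ∨ ys.length = 1 then x * y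
  else
    -- n = -(-max(len(xs), len(ys)) // k) * k
    let n : Int := -(PySem.Int.floordiv (-(max (xs.length : Int) (ys.length : Int))) k) * k
    pvMainB xs ys k n

-- ===== PRECONDITION & SPEC =====
-- Pre_ excludes exactly the inputs on which A raises: k = 0 past the base case
-- (ZeroDivisionError in n % k), and a negative operand together with 1 ≤ k and
-- max digit-length ≤ k, where the padded split has parts of size 1 so that
-- int('-') raises ValueError.  B raises on exactly the same inputs.
def Pre_toom_cook_recursive (x : Int) (y : Int) (k : Int) : Prop :=
  ((PySem.Int.toChars x).length = 1 ∨ (PySem.Int.toChars y).length = 1) ∨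
  (k ≠ 0 ∧ ((0 ≤ x ∧ 0 ≤ y) ∨
    ¬(1 ≤ k ∧ (max (PySem.Int.toChars x).length (PySem.Int.toChars y).length : Int) ≤ k)))
instance (x : Int) (y : Int) (k : Int) : Decidable (Pre_toom_cook_recursive x y k) := by
  unfold Pre_toom_cook_recursive; infer_instance

def pvWitness_toom_cook_recursive : Int × Int × Int := (1234, 5678, 2)

def Spec_toom_cook_recursive (x : Int) (y : Int) (k : Int) (out : Int) : Prop := out = toom_cook_recursive_alt x y k
instance (x : Int) (y : Int) (k : Int) (out : Int) : Decidable (Spec_toom_cook_recursive x y k out) := by unfold Spec_toom_cook_recursive; infer_instance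

-- ===== CLAIM (what is proved, stated in full; the proofs are below) =====
def Claim_equal_toom_cook_recursive : Prop := ∀ (x : Int) (y : Int) (k : Int), Dom_toom_cook_recursive x y k → Pre_toom_cook_recursive x y k → Spec_toom_cook_recursive x y k (toom_cook_recursive x y k)

-- ===== LEMMAS AND PROOFS =====

-- ---- generic list helpers ----

theorem pv_getD_set_self {a : Type} (l : List a) (n : Nat) (x d : a) (h : n < l.length) :
    (l.set n x).getD n d = x := by
  simp [List.getD_eq_getElem?_getD, h]

theorem pv_getD_set_ne {a : Type} (l : List a) (n m : Nat) (x d : a) (h : m ≠ n) :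
    (l.set n x).getD m d = l.getD m d := by
  simp [List.getD_eq_getElem?_getD, List.getElem?_set_ne (Ne.symm h)]

theorem pv_getD_map_range {a : Type} (f : Nat → a) (n i : Nat) (d : a) (h : i < n) :
    ((List.range n).map f).getD i d = f i := by
  simp [List.getD_eq_getElem?_getD, h]

theorem pv_getD_mem {a : Type} (l : List a) (n : Nat) (d : a) (h : n < l.length) :
    l.getD n d ∈ l := by
  rw [List.getD_eq_getElem?_getD, List.getElem?_eq_getElem h]
  exact List.getElem_mem h

theorem pv_take_set_succ {a : Type} (l : List a) (s : Nat) (x : a) (h : s < l.length) :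
    (l.set s x).take (s + 1) = l.take s ++ [x] := by
  induction l generalizing s with
  | nil => simp at h
  | cons b l ih =>
    cases s with
    | zero => simp
    | succ s => simp [List.set_cons_succ, List.take_succ_cons, ih s (by simpa using h)]

theorem pv_drop_eq_map_range' {a : Type} (l : List a) (s : Nat) (d : a) :
    l.drop s = (List.range' s (l.length - s)).map (fun j => l.getD j d) := by
  apply List.ext_getElem
  · simp
  · intro i h1 h2
    have hs : s + i < l.length := by simp at h1; omega
    simp [List.getElem_drop, List.getElem_range', List.getD_eq_getElem?_getD,
      List.getElem?_eq_getElem hs]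

-- the workhorse: a loop 'for j in range(s, s+t): v[j] = f(j, v[j])' whose body
-- reads only position j rebuilds the suffix pointwise
theorem pv_fold_set_suffix (f : Nat → Int → Int) :
    ∀ (t s : Nat) (w : List Int), s + t = w.length →
    (List.range' s t).foldl (fun v j => v.set j (f j (v.getD j 0))) w
      = w.take s ++ (List.range' s t).map (fun j => f j (w.getD j 0)) := by
  intro t
  induction t with
  | zero =>
    intro s w h
    simp [List.take_of_length_le (by omega : w.length ≤ s)]
  | succ t ih =>
    intro s w h
    have hs : s < w.length := by omega
    rw [List.range'_succ, List.foldl_cons, List.map_cons]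
    rw [ih (s + 1) (w.set s (f s (w.getD s 0))) (by simp; omega)]
    rw [pv_take_set_succ w s _ hs]
    have hmapeq : (List.range' (s + 1) t).map
        (fun j => f j ((w.set s (f s (w.getD s 0))).getD j 0))
        = (List.range' (s + 1) t).map (fun j => f j (w.getD j 0)) := by
      apply List.map_congr_left
      intro j hj
      have hjs : j ≠ s := by have := (List.mem_range'_1.mp hj).1; omega
      rw [pv_getD_set_ne _ _ _ _ _ hjs]
    rw [hmapeq, List.append_assoc, List.singleton_append]

-- 'for i in range(m): v[i] = f(i)' on v = [0]*m is just a table of f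
theorem pv_fold_set_fill (f : Nat → Int) (mN : Nat) :
    (List.range mN).foldl (fun v i => v.set i (f i)) (List.replicate mN (0 : Int))
      = (List.range mN).map f := by
  have h := pv_fold_set_suffix (fun i _ => f i) mN 0 (List.replicate mN (0 : Int)) (by simp)
  rw [List.range_eq_range']
  exact h.trans (by simp)

-- ---- Horner / polynomial-evaluation lemmas ----

theorem pv_horner_nil (t : Int) : pvHorner [] t = 0 := rfl

theorem pv_horner_cons (c : Int) (cs : List Int) (t : Int) :
    pvHorner (c :: cs) t = c + t * pvHorner cs t := rfl

theorem pv_horner_replicate_zero (n : Nat) (t : Int) :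
    pvHorner (List.replicate n 0) t = 0 := by
  induction n with
  | zero => rfl
  | succ n ih => rw [List.replicate_succ, pv_horner_cons, ih]; ring

theorem pv_getD_cons_succ {a : Type} (x : a) (l : List a) (j : Nat) (d : a) :
    (x :: l).getD (j + 1) d = l.getD j d := by
  simp [List.getD_eq_getElem?_getD]

theorem pv_horner_set_add (t c : Int) :
    ∀ (l : List Int) (j : Nat), j < l.length →
    pvHorner (l.set j (l.getD j 0 + c)) t = pvHorner l t + c * t ^ j := by
  intro l
  induction l with
  | nil => intro j h; simp at h
  | cons a l ih =>
    intro j hj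
    cases j with
    | zero => simp [pv_horner_cons]; ring
    | succ j =>
      have hj' : j < l.length := by simpa using hj
      rw [List.set_cons_succ, pv_horner_cons, pv_getD_cons_succ, ih j hj', pv_horner_cons]
      ring

theorem pv_sum_range_getD_eq_horner (t : Int) :
    ∀ (l : List Int),
    ((List.range l.length).map (fun j => l.getD j 0 * t ^ j)).sum = pvHorner l t := by
  intro l
  induction l with
  | nil => simp [pv_horner_nil]
  | cons a l ih =>
    rw [List.length_cons, List.range_succ_eq_map]
    rw [List.map_cons, List.map_map, List.sum_cons]
    rw [show (List.range l.length).map ((fun j => (a :: l).getD j 0 * t ^ j) ∘ Nat.succ)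
        = (List.range l.length).map (fun j => t * (l.getD j 0 * t ^ j)) from by
      apply List.map_congr_left
      intro j _
      show (a :: l).getD (j + 1) 0 * t ^ (j + 1) = t * (l.getD j 0 * t ^ j)
      rw [pv_getD_cons_succ]
      ring]
    rw [List.sum_map_mul_left, ih, List.getD_cons_zero, pv_horner_cons]
    ring

-- every loop 'for i in L: acc += g(i)' is init + Σ g
theorem pv_foldl_add (g : Nat → Int) :
    ∀ (L : List Nat) (a : Int), L.foldl (fun acc i => acc + g i) a = a + (L.map g).sum := by
  intro L
  induction L with
  | nil => intro a; simp
  | cons i L ih =>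
    intro a
    rw [List.foldl_cons, ih, List.map_cons, List.sum_cons]
    ring

-- ---- convolution = product of evaluations ----

theorem pv_conv_inner_length (a b : List Int) (i : Nat) :
    ∀ (J : List Nat) (r : List Int),
    (J.foldl (fun r j => r.set (i + j) (r.getD (i + j) 0 + a.getD i 0 * b.getD j 0)) r).length
      = r.length := by
  intro J
  induction J with
  | nil => intro r; rfl
  | cons j J ih => intro r; rw [List.foldl_cons, ih]; simp

theorem pv_conv_inner (a b : List Int) (i : Nat) (t : Int) :
    ∀ (J : List Nat) (r : List Int), (∀ j ∈ J, i + j < r.length) →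
    pvHorner (J.foldl (fun r j => r.set (i + j) (r.getD (i + j) 0 + a.getD i 0 * b.getD j 0)) r) t
      = pvHorner r t + a.getD i 0 * ((J.map (fun j => b.getD j 0 * t ^ j)).sum) * t ^ i := by
  intro J
  induction J with
  | nil => intro r _; simp
  | cons j J ih =>
    intro r hr
    rw [List.foldl_cons, ih _ (by
      intro j' hj'
      rw [List.length_set]
      exact hr j' (List.mem_cons_of_mem _ hj'))]
    rw [pv_horner_set_add t _ r (i + j) (hr j List.mem_cons_self)]
    rw [List.map_cons, List.sum_cons, pow_add]
    ring

theorem pv_conv_outer (a b : List Int) (t : Int) (kn : Nat) (hb : b.length = kn) :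
    ∀ (L : List Nat) (r : List Int), (∀ i ∈ L, ∀ j, j < kn → i + j < r.length) →
    pvHorner (L.foldl (fun r i => (List.range kn).foldl
        (fun r j => r.set (i + j) (r.getD (i + j) 0 + a.getD i 0 * b.getD j 0)) r) r) t
      = pvHorner r t + ((L.map (fun i => a.getD i 0 * t ^ i)).sum) * pvHorner b t := by
  intro L
  induction L with
  | nil => intro r _; simp
  | cons i L ih =>
    intro r hr
    rw [List.foldl_cons, ih _ (by
      intro i' hi' j hj
      rw [pv_conv_inner_length]
      exact hr i' (List.mem_cons_of_mem _ hi') j hj)]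
    rw [pv_conv_inner a b i t (List.range kn) r (by
      intro j hj
      exact hr i List.mem_cons_self j (List.mem_range.mp hj))]
    rw [show ((List.range kn).map (fun j => b.getD j 0 * t ^ j)).sum = pvHorner b t from by
      rw [← hb, pv_sum_range_getD_eq_horner]]
    rw [List.map_cons, List.sum_cons]
    ring

theorem pv_conv_outer_length (kn : Nat) (a b : List Int) :
    ∀ (L : List Nat) (r : List Int),
    (L.foldl (fun r i => (List.range kn).foldl
      (fun r j => r.set (i + j) (r.getD (i + j) 0 + a.getD i 0 * b.getD j 0)) r) r).length
      = r.length := by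
  intro L
  induction L with
  | nil => intro r; rfl
  | cons i L ih => intro r; rw [List.foldl_cons, ih, pv_conv_inner_length]

theorem pv_conv_length (kn len2 : Nat) (a b : List Int) :
    (pvConvA kn len2 a b).length = len2 := by
  unfold pvConvA
  rw [pv_conv_outer_length, List.length_replicate]

theorem pv_conv_horner (kn : Nat) (hkn : 1 ≤ kn) (a b : List Int)
    (ha : a.length = kn) (hb : b.length = kn) (t : Int) :
    pvHorner (pvConvA kn (2 * kn - 1) a b) t = pvHorner a t * pvHorner b t := by
  unfold pvConvA
  rw [pv_conv_outer a b t kn hb (List.range kn) _ (by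
    intro i hi j hj
    rw [List.length_replicate]
    have := List.mem_range.mp hi
    omega)]
  rw [pv_horner_replicate_zero]
  rw [show ((List.range kn).map (fun i => a.getD i 0 * t ^ i)).sum = pvHorner a t from by
    rw [← ha, pv_sum_range_getD_eq_horner]]
  ring

-- ---- the sampling loop ----

theorem pv_sample_eq (mN len2 : Nat) (r : List Int) (hr : r.length = len2) :
    pvSampleA mN len2 r = (List.range mN).map (fun (i : Nat) => pvHorner r (i : Int)) := by
  unfold pvSampleA
  refine (pv_fold_set_fill
    (fun i => ((List.range len2).map (fun (j : Nat) => r.getD j 0 * (i : Int) ^ j)).sum) mN).trans ?_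
  apply List.map_congr_left
  intro i _
  rw [← hr, pv_sum_range_getD_eq_horner]

-- ---- splitting: chunks = indexed slices ----

theorem pv_chunks_length (ps : Int) : ∀ (c : Nat) (s : List Char), (pvChunks ps c s).length = c := by
  intro c
  induction c with
  | zero => intro s; rfl
  | succ c ih => intro s; simp [pvChunks, ih]

theorem pv_chunks_eq (pn : Nat) :
    ∀ (c : Nat) (s : List Char),
    pvChunks (pn : Int) c s
      = (List.range c).map (fun (i : Nat) => pvIntA ((s.drop (i * pn)).take pn)) := by
  intro c
  induction c with
  | zero => intro s; rfl
  | succ c ih =>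
    intro s
    rw [pvChunks, ih, List.range_succ_eq_map, List.map_cons, List.map_map]
    congr 1
    · show (PySem.Int.ofChars? (PySem.List.slice s none (some (pn : Int)))).getD 0
        = pvIntA ((s.drop (0 * pn)).take pn)
      rw [PySem.List.slice_to_natCast]
      simp [pvIntA]
    · rw [PySem.List.slice_from_natCast]
      apply List.map_congr_left
      intro i _
      show pvIntA (((s.drop pn).drop (i * pn)).take pn)
        = pvIntA ((s.drop ((i + 1) * pn)).take pn)
      rw [List.drop_drop,
        show pn + i * pn = (i + 1) * pn from by rw [Nat.succ_mul]; omega]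

theorem pv_slice_chunk (s : List Char) (pn i : Nat) :
    PySem.List.slice s (some ((i : Int) * (pn : Int))) (some (((i : Int) + 1) * (pn : Int)))
      = (s.drop (i * pn)).take pn := by
  rw [show ((i : Int) * (pn : Int)) = ((i * pn : Nat) : Int) by push_cast; ring,
      show (((i : Int) + 1) * (pn : Int)) = (((i + 1) * pn : Nat) : Int) by push_cast; ring,
      PySem.List.slice_natCast]
  congr 1
  rw [Nat.succ_mul]
  omega

theorem pv_parts_chunks (s : List Char) (kn : Nat) (ps : Int) (hps : 0 ≤ ps) :
    (List.range kn).map (fun i => pvIntA ((pvPartsA s kn ps).getD i [])) = pvChunks ps kn s := by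
  obtain ⟨pn, rfl⟩ : ∃ pn : Nat, ps = (pn : Int) := ⟨ps.toNat, (Int.toNat_of_nonneg hps).symm⟩
  rw [pv_chunks_eq pn kn s]
  apply List.map_congr_left
  intro i hi
  rw [pvPartsA, pv_getD_map_range _ _ _ _ (List.mem_range.mp hi), pv_slice_chunk]

-- ---- the Vandermonde matrix: running products = powers ----

theorem pv_pows_eq (t : Int) :
    ∀ (m : Nat) (p : Int), pvPows t m p = (List.range m).map (fun (j : Nat) => p * t ^ j) := by
  intro m
  induction m with
  | zero => intro p; rfl
  | succ m ih =>
    intro p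
    rw [pvPows, ih, List.range_succ_eq_map, List.map_cons, List.map_map]
    congr 1
    · simp
    · apply List.map_congr_left
      intro j _
      show p * t * t ^ j = p * t ^ (j + 1)
      ring

theorem pv_vander_eq (mN : Nat) :
    (List.range mN).map (fun (i : Nat) => pvPows (i : Int) mN 1) = pvVanderA mN := by
  unfold pvVanderA
  apply List.map_congr_left
  intro i _
  rw [pv_pows_eq]
  apply List.map_congr_left
  intro j _
  ring

-- ---- Gaussian elimination: A's in-place folds = B's bulk rebuilds ----

-- the per-row factor and the rebuilt row, as B computes them
def pvFac (i : Nat) (Am : List (List Int)) (j : Nat) : Int :=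
  PySem.Int.floordiv ((Am.getD j []).getD i 0) ((Am.getD i []).getD i 0)

def pvRowUpd (mN i : Nat) (Am : List (List Int)) (row : List Int) : List Int :=
  row.take i ++ (List.range' i (mN - i)).map
    (fun t => row.getD t 0 - PySem.Int.floordiv (row.getD i 0) ((Am.getD i []).getD i 0)
      * (Am.getD i []).getD t 0)

theorem pv_rowUpd_length (mN i : Nat) (Am : List (List Int)) (row : List Int)
    (hrow : row.length = mN) (hi : i ≤ mN) : (pvRowUpd mN i Am row).length = mN := by
  unfold pvRowUpd
  rw [List.length_append, List.length_take, List.length_map, List.length_range', hrow]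
  omega

theorem pv_rowUpd_congr (mN i : Nat) (Am Am' : List (List Int))
    (h : Am.getD i [] = Am'.getD i []) : pvRowUpd mN i Am = pvRowUpd mN i Am' := by
  unfold pvRowUpd
  rw [h]

-- proof-side mirror of B's elimination step keeping the full coeff list by set
-- (bridged to B's prepend-accumulator version below)
def pvElim (mN : Nat) : Nat → List (List Int) × List Int × List Int →
    List (List Int) × List Int × List Int
  | 0, st => st
  | fuel + 1, (Am, v, coeffs) =>
      let i := mN - (fuel + 1)
      let piv := (Am.getD i []).getD i 0
      let vi := v.getD i 0
      let Ai := Am.getD i []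
      let v1 := v.take (i + 1) ++ (List.range' (i + 1) (mN - (i + 1))).map
        (fun j => v.getD j 0 - PySem.Int.floordiv ((Am.getD j []).getD i 0) piv * vi)
      let Am1 := Am.take (i + 1) ++ (Am.drop (i + 1)).map
        (fun row => row.take i ++ (List.range' i (mN - i)).map
          (fun t => row.getD t 0 - PySem.Int.floordiv (row.getD i 0) piv * Ai.getD t 0))
      let p := mN - 1 - i
      let c := PySem.Int.floordiv (v1.getD p 0) ((Am1.getD p []).getD p 0)
      let v2 := v1.take (i + 1) ++ (List.range' (i + 1) (mN - (i + 1))).map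
        (fun j => v1.getD j 0 - c * (Am1.getD j []).getD p 0)
      pvElim mN fuel (Am1, v2, coeffs.set p c)

-- the innermost 'for k in range(i, m)' rewrites one matrix row in place
theorem pv_mrow (i j : Nat) (factor : Int) (hij : j ≠ i) :
    ∀ (T : List Nat) (Am : List (List Int)), j < Am.length →
    T.foldl (fun Am t => Am.set j ((Am.getD j []).set t
        ((Am.getD j []).getD t 0 - factor * (Am.getD i []).getD t 0))) Am
      = Am.set j (T.foldl (fun r t => r.set t
          (r.getD t 0 - factor * (Am.getD i []).getD t 0)) (Am.getD j [])) := by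
  intro T
  induction T with
  | nil =>
    intro Am hj
    rw [List.foldl_nil, List.foldl_nil]
    rw [List.getD_eq_getElem?_getD, List.getElem?_eq_getElem hj]
    simp [List.set_getElem_self]
  | cons t T ih =>
    intro Am hj
    rw [List.foldl_cons, List.foldl_cons]
    rw [ih _ (by simpa using hj)]
    rw [List.set_set]
    rw [pv_getD_set_self _ _ _ _ hj]
    congr 1
    rw [show (fun (r : List Int) (t' : Nat) => r.set t'
        (r.getD t' 0 - factor * ((Am.set j ((Am.getD j []).set t
          ((Am.getD j []).getD t 0 - factor * (Am.getD i []).getD t 0))).getD i []).getD t' 0))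
        = (fun (r : List Int) (t' : Nat) => r.set t'
          (r.getD t' 0 - factor * (Am.getD i []).getD t' 0)) from by
      funext r t'
      rw [pv_getD_set_ne _ _ _ _ _ (Ne.symm hij)]]

-- proof-side names for A's loop bodies (definitionally equal to the lambdas in
-- pvGaussA, with the lets and projections expanded)
def pvElimStep (mN i : Nat) (st2 : List (List Int) × List Int) (j : Nat) :
    List (List Int) × List Int :=
  ((List.range' i (mN - i)).foldl (fun Am t =>
      Am.set j ((Am.getD j []).set t ((Am.getD j []).getD t 0
        - PySem.Int.floordiv ((st2.1.getD j []).getD i 0) ((st2.1.getD i []).getD i 0)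
          * (Am.getD i []).getD t 0))) st2.1,
   st2.2.set j (st2.2.getD j 0
     - PySem.Int.floordiv ((st2.1.getD j []).getD i 0) ((st2.1.getD i []).getD i 0)
       * st2.2.getD i 0))

def pvElimPass (mN i : Nat) (Amv : List (List Int) × List Int) :
    List (List Int) × List Int :=
  (List.range' (i + 1) (mN - (i + 1))).foldl (pvElimStep mN i) Amv

def pvGaussStep (mN : Nat) (st : List (List Int) × List Int × List Int) (i : Nat) :
    List (List Int) × List Int × List Int :=
  ((pvElimPass mN i (st.1, st.2.1)).1,
   (List.range' (i + 1) (mN - (i + 1))).foldl (fun v j => v.set j (v.getD j 0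
     - PySem.Int.floordiv ((pvElimPass mN i (st.1, st.2.1)).2.getD (mN - 1 - i) 0)
         (((pvElimPass mN i (st.1, st.2.1)).1.getD (mN - 1 - i) []).getD (mN - 1 - i) 0)
       * ((pvElimPass mN i (st.1, st.2.1)).1.getD j []).getD (mN - 1 - i) 0))
     (pvElimPass mN i (st.1, st.2.1)).2,
   st.2.2.set (mN - 1 - i)
     (PySem.Int.floordiv ((pvElimPass mN i (st.1, st.2.1)).2.getD (mN - 1 - i) 0)
       (((pvElimPass mN i (st.1, st.2.1)).1.getD (mN - 1 - i) []).getD (mN - 1 - i) 0)))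

-- one inner elimination loop ('for j in range(i+1, m)') characterized over the
-- state at its start
theorem pv_elimloop (mN i : Nat) :
    ∀ (t s : Nat) (Am : List (List Int)) (v : List Int),
      i < s → s + t = mN → Am.length = mN → (∀ row ∈ Am, row.length = mN) → v.length = mN →
    (List.range' s t).foldl (pvElimStep mN i) (Am, v)
      = (Am.take s ++ (List.range' s t).map (fun j => pvRowUpd mN i Am (Am.getD j [])),
         v.take s ++ (List.range' s t).map (fun j => v.getD j 0 - pvFac i Am j * v.getD i 0)) := by
  intro t
  induction t with
  | zero =>
    intro s Am v his hst hA hrows hv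
    rw [List.range'_zero, List.foldl_nil, List.map_nil, List.map_nil,
      List.append_nil, List.append_nil,
      List.take_of_length_le (by omega), List.take_of_length_le (by omega)]
  | succ t ih =>
    intro s Am v his hst hA hrows hv
    have hsm : s < mN := by omega
    have hsA : s < Am.length := by omega
    have hsne : s ≠ i := by omega
    have hine : i ≠ s := by omega
    have hrowlen : (Am.getD s []).length = mN := hrows _ (pv_getD_mem _ _ _ hsA)
    rw [List.range'_succ, List.foldl_cons]
    rw [show pvElimStep mN i (Am, v) s
        = (Am.set s (pvRowUpd mN i Am (Am.getD s [])),
           v.set s (v.getD s 0 - pvFac i Am s * v.getD i 0)) from by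
      unfold pvElimStep
      dsimp only
      rw [pv_mrow i s
        (PySem.Int.floordiv ((Am.getD s []).getD i 0) ((Am.getD i []).getD i 0))
        hsne (List.range' i (mN - i)) Am hsA]
      rw [show (List.range' i (mN - i)).foldl (fun r t => r.set t (r.getD t 0
            - PySem.Int.floordiv ((Am.getD s []).getD i 0) ((Am.getD i []).getD i 0)
              * (Am.getD i []).getD t 0)) (Am.getD s [])
          = (Am.getD s []).take i ++ (List.range' i (mN - i)).map (fun t =>
              (Am.getD s []).getD t 0
                - PySem.Int.floordiv ((Am.getD s []).getD i 0) ((Am.getD i []).getD i 0)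
                  * (Am.getD i []).getD t 0)
        from pv_fold_set_suffix (fun tt xv => xv
          - PySem.Int.floordiv ((Am.getD s []).getD i 0) ((Am.getD i []).getD i 0)
            * (Am.getD i []).getD tt 0) (mN - i) i (Am.getD s []) (by rw [hrowlen]; omega)]
      rfl]
    rw [ih (s + 1) (Am.set s (pvRowUpd mN i Am (Am.getD s [])))
      (v.set s (v.getD s 0 - pvFac i Am s * v.getD i 0))
      (by omega) (by omega) (by simpa using hA)
      (by
        intro row hrow
        rcases List.mem_or_eq_of_mem_set hrow with h | h
        · exact hrows _ h
        · rw [h]; exact pv_rowUpd_length mN i Am _ hrowlen (by omega))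
      (by simpa using hv)]
    have hAi : (Am.set s (pvRowUpd mN i Am (Am.getD s []))).getD i [] = Am.getD i [] :=
      pv_getD_set_ne _ _ _ _ _ hine
    have hvi : (v.set s (v.getD s 0 - pvFac i Am s * v.getD i 0)).getD i 0 = v.getD i 0 :=
      pv_getD_set_ne _ _ _ _ _ hine
    rw [pv_take_set_succ _ _ _ hsA, pv_take_set_succ _ _ _ (by omega)]
    rw [List.map_cons, List.map_cons]
    rw [show (List.range' (s + 1) t).map
        (fun j => pvRowUpd mN i (Am.set s (pvRowUpd mN i Am (Am.getD s [])))
          ((Am.set s (pvRowUpd mN i Am (Am.getD s []))).getD j []))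
        = (List.range' (s + 1) t).map (fun j => pvRowUpd mN i Am (Am.getD j [])) from by
      apply List.map_congr_left
      intro j hj
      have hjs : j ≠ s := by have := (List.mem_range'_1.mp hj).1; omega
      rw [pv_getD_set_ne _ _ _ _ _ hjs, pv_rowUpd_congr mN i _ Am hAi]]
    rw [show (List.range' (s + 1) t).map
        (fun j => (v.set s (v.getD s 0 - pvFac i Am s * v.getD i 0)).getD j 0
          - pvFac i (Am.set s (pvRowUpd mN i Am (Am.getD s []))) j
              * (v.set s (v.getD s 0 - pvFac i Am s * v.getD i 0)).getD i 0)
        = (List.range' (s + 1) t).map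
            (fun j => v.getD j 0 - pvFac i Am j * v.getD i 0) from by
      apply List.map_congr_left
      intro j hj
      have hjs : j ≠ s := by have := (List.mem_range'_1.mp hj).1; omega
      unfold pvFac
      rw [hAi, pv_getD_set_ne _ _ _ _ _ hjs, pv_getD_set_ne _ _ _ _ _ hjs,
        pv_getD_set_ne _ _ _ _ _ hine]]
    rw [List.append_assoc, List.singleton_append, List.append_assoc, List.singleton_append]

theorem pv_elimpass_eq (mN i : Nat) (Am : List (List Int)) (v : List Int)
    (hi : i < mN) (hA : Am.length = mN) (hrows : ∀ row ∈ Am, row.length = mN)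
    (hv : v.length = mN) :
    pvElimPass mN i (Am, v)
      = (Am.take (i + 1) ++ (List.range' (i + 1) (mN - (i + 1))).map
           (fun j => pvRowUpd mN i Am (Am.getD j [])),
         v.take (i + 1) ++ (List.range' (i + 1) (mN - (i + 1))).map
           (fun j => v.getD j 0 - pvFac i Am j * v.getD i 0)) := by
  unfold pvElimPass
  exact pv_elimloop mN i (mN - (i + 1)) (i + 1) Am v (by omega) (by omega) hA hrows hv

-- one full pass of A's outer loop, by induction on the remaining fuel
theorem pv_gauss_loop (mN : Nat) :
    ∀ (fuel : Nat) (Am : List (List Int)) (v co : List Int), fuel ≤ mN →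
    Am.length = mN → (∀ row ∈ Am, row.length = mN) → v.length = mN →
    (List.range' (mN - fuel) fuel).foldl (pvGaussStep mN) (Am, v, co)
      = pvElim mN fuel (Am, v, co) := by
  intro fuel
  induction fuel with
  | zero =>
    intro Am v co _ _ _ _
    rw [List.range'_zero, List.foldl_nil, pvElim]
  | succ fuel ih =>
    intro Am v co hf hA hrows hv
    rw [List.range'_succ, List.foldl_cons]
    have hbody : pvGaussStep mN (Am, v, co) (mN - (fuel + 1))
        = ((Am.take (mN - (fuel + 1) + 1) ++ (Am.drop (mN - (fuel + 1) + 1)).map (fun row => row.take (mN - (fuel + 1)) ++ (List.range' (mN - (fuel + 1)) (mN - (mN - (fuel + 1)))).map (fun t => row.getD t 0 - PySem.Int.floordiv (row.getD (mN - (fuel + 1)) 0) ((Am.getD (mN - (fuel + 1)) []).getD (mN - (fuel + 1)) 0) * (Am.getD (mN - (fuel + 1)) []).getD t 0))), ((v.take (mN - (fuel + 1) + 1) ++ (List.range' (mN - (fuel + 1) + 1) (mN - (mN - (fuel + 1) + 1))).map (fun j => v.getD j 0 - pvFac (mN - (fuel + 1)) Am j * v.getD (mN - (fuel + 1)) 0)).take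 (mN - (fuel + 1) + 1) ++ (List.range' (mN - (fuel + 1) + 1) (mN - (mN - (fuel + 1) + 1))).map (fun j => (v.take (mN - (fuel + 1) + 1) ++ (List.range' (mN - (fuel + 1) + 1) (mN - (mN - (fuel + 1) + 1))).map (fun j => v.getD j 0 - pvFac (mN - (fuel + 1)) Am j * v.getD (mN - (fuel + 1)) 0)).getD j 0 - (PySem.Int.floordiv ((v.take (mN - (fuel + 1) + 1) ++ (List.range' (mN - (fuel + 1) + 1) (mN - (mN - (fuel + 1) + 1))).map (fun j => v.getD j 0 - pvFac (mN - (fuel + 1)) Am j * v.getD (mN - (fuel + 1)) 0)).getD (mN - 1 - (mN - (fuel + 1))) 0) (((Am.take (mN - (fuel + 1) + 1) ++ (Am.drop (mN - (fuel + 1) + 1)).map (fun row => row.take (mN - (fuel + 1)) ++ (List.range' (mN - (fuel + 1)) (mN - (mN - (fuel + 1)))).map (fun t => row.getD t 0 - PySem.Int.floordiv (row.getD (mN - (fuel + 1)) 0) ((Am.getD (mN - (fuel + 1)) []).getD (mN - (fuel + 1)) 0) * (Am.getD (mN - (fuel + 1)) []).getD t 0))).getD (mN - 1 - (mN - (fuel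 + 1))) []).getD (mN - 1 - (mN - (fuel + 1))) 0)) * ((Am.take (mN - (fuel + 1) + 1) ++ (Am.drop (mN - (fuel + 1) + 1)).map (fun row => row.take (mN - (fuel + 1)) ++ (List.range' (mN - (fuel + 1)) (mN - (mN - (fuel + 1)))).map (fun t => row.getD t 0 - PySem.Int.floordiv (row.getD (mN - (fuel + 1)) 0) ((Am.getD (mN - (fuel + 1)) []).getD (mN - (fuel + 1)) 0) * (Am.getD (mN - (fuel + 1)) []).getD t 0))).getD j []).getD (mN - 1 - (mN - (fuel + 1))) 0)), co.set (mN - 1 - (mN - (fuel + 1))) (PySem.Int.floordiv ((v.take (mN - (fuel + 1) + 1) ++ (List.range' (mN - (fuel + 1) + 1) (mN - (mN - (fuel + 1) + 1))).map (fun j => v.getD j 0 - pvFac (mN - (fuel + 1)) Am j * v.getD (mN - (fuel + 1)) 0)).getD (mN - 1 - (mN - (fuel + 1))) 0) (((Am.take (mN - (fuel + 1) + 1) ++ (Am.drop (mN - (fuel + 1) + 1)).map (fun row => row.take (mN - (fuel + 1)) ++ (List.range' (mN - (fuel + 1)) (mN - (mN - (fuel + 1)))).map (fun t => row.getD t 0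 - PySem.Int.floordiv (row.getD (mN - (fuel + 1)) 0) ((Am.getD (mN - (fuel + 1)) []).getD (mN - (fuel + 1)) 0) * (Am.getD (mN - (fuel + 1)) []).getD t 0))).getD (mN - 1 - (mN - (fuel + 1))) []).getD (mN - 1 - (mN - (fuel + 1))) 0))) := by
      unfold pvGaussStep
      dsimp only
      rw [pv_elimpass_eq mN (mN - (fuel + 1)) Am v (by omega) hA hrows hv]
      dsimp only
      rw [show (Am.take (mN - (fuel + 1) + 1) ++ (List.range' (mN - (fuel + 1) + 1) (mN - (mN - (fuel + 1) + 1))).map (fun j => pvRowUpd mN (mN - (fuel + 1)) Am (Am.getD j []))) = (Am.take (mN - (fuel + 1) + 1) ++ (Am.drop (mN - (fuel + 1) + 1)).map (fun row => row.take (mN - (fuel + 1)) ++ (List.range' (mN - (fuel + 1)) (mN - (mN - (fuel + 1)))).map (fun t => row.getD t 0 - PySem.Int.floordiv (row.getD (mN - (fuel + 1)) 0) ((Am.getD (mN - (fuel + 1)) []).getD (mN - (fuel + 1)) 0) * (Am.getD (mN - (fuel + 1)) []).getD t 0))) from by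
        rw [pv_drop_eq_map_range' Am (mN - (fuel + 1) + 1) ([] : List Int), hA, List.map_map]
        rfl]
      rw [show (List.range' (mN - (fuel + 1) + 1) (mN - (mN - (fuel + 1) + 1))).foldl
            (fun w j => w.set j (w.getD j 0 - (PySem.Int.floordiv ((v.take (mN - (fuel + 1) + 1) ++ (List.range' (mN - (fuel + 1) + 1) (mN - (mN - (fuel + 1) + 1))).map (fun j => v.getD j 0 - pvFac (mN - (fuel + 1)) Am j * v.getD (mN - (fuel + 1)) 0)).getD (mN - 1 - (mN - (fuel + 1))) 0) (((Am.take (mN - (fuel + 1) + 1) ++ (Am.drop (mN - (fuel + 1) + 1)).map (fun row => row.take (mN - (fuel + 1)) ++ (List.range' (mN - (fuel + 1)) (mN - (mN - (fuel + 1)))).map (fun t => row.getD t 0 - PySem.Int.floordiv (row.getD (mN - (fuel + 1)) 0) ((Am.getD (mN - (fuel + 1)) []).getD (mN - (fuel + 1)) 0) * (Am.getD (mN - (fuel + 1)) []).getD t 0))).getD (mN - 1 - (mN - (fuel + 1))) []).getD (mN - 1 - (mN - (fuel + 1))) 0)) * ((Am.take (mN - (fuel + 1) + 1) ++ (Am.drop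 (mN - (fuel + 1) + 1)).map (fun row => row.take (mN - (fuel + 1)) ++ (List.range' (mN - (fuel + 1)) (mN - (mN - (fuel + 1)))).map (fun t => row.getD t 0 - PySem.Int.floordiv (row.getD (mN - (fuel + 1)) 0) ((Am.getD (mN - (fuel + 1)) []).getD (mN - (fuel + 1)) 0) * (Am.getD (mN - (fuel + 1)) []).getD t 0))).getD j []).getD (mN - 1 - (mN - (fuel + 1))) 0)) (v.take (mN - (fuel + 1) + 1) ++ (List.range' (mN - (fuel + 1) + 1) (mN - (mN - (fuel + 1) + 1))).map (fun j => v.getD j 0 - pvFac (mN - (fuel + 1)) Am j * v.getD (mN - (fuel + 1)) 0))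
          = ((v.take (mN - (fuel + 1) + 1) ++ (List.range' (mN - (fuel + 1) + 1) (mN - (mN - (fuel + 1) + 1))).map (fun j => v.getD j 0 - pvFac (mN - (fuel + 1)) Am j * v.getD (mN - (fuel + 1)) 0)).take (mN - (fuel + 1) + 1) ++ (List.range' (mN - (fuel + 1) + 1) (mN - (mN - (fuel + 1) + 1))).map (fun j => (v.take (mN - (fuel + 1) + 1) ++ (List.range' (mN - (fuel + 1) + 1) (mN - (mN - (fuel + 1) + 1))).map (fun j => v.getD j 0 - pvFac (mN - (fuel + 1)) Am j * v.getD (mN - (fuel + 1)) 0)).getD j 0 - (PySem.Int.floordiv ((v.take (mN - (fuel + 1) + 1) ++ (List.range' (mN - (fuel + 1) + 1) (mN - (mN - (fuel + 1) + 1))).map (fun j => v.getD j 0 - pvFac (mN - (fuel + 1)) Am j * v.getD (mN - (fuel + 1)) 0)).getD (mN - 1 - (mN - (fuel + 1))) 0) (((Am.take (mN - (fuel + 1) + 1) ++ (Am.drop (mN - (fuel + 1) + 1)).map (fun row => row.take (mN - (fuel + 1)) ++ (List.range' (mN - (fuel + 1)) (mN - (mN - (fuel + 1)))).map (fun t =>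 row.getD t 0 - PySem.Int.floordiv (row.getD (mN - (fuel + 1)) 0) ((Am.getD (mN - (fuel + 1)) []).getD (mN - (fuel + 1)) 0) * (Am.getD (mN - (fuel + 1)) []).getD t 0))).getD (mN - 1 - (mN - (fuel + 1))) []).getD (mN - 1 - (mN - (fuel + 1))) 0)) * ((Am.take (mN - (fuel + 1) + 1) ++ (Am.drop (mN - (fuel + 1) + 1)).map (fun row => row.take (mN - (fuel + 1)) ++ (List.range' (mN - (fuel + 1)) (mN - (mN - (fuel + 1)))).map (fun t => row.getD t 0 - PySem.Int.floordiv (row.getD (mN - (fuel + 1)) 0) ((Am.getD (mN - (fuel + 1)) []).getD (mN - (fuel + 1)) 0) * (Am.getD (mN - (fuel + 1)) []).getD t 0))).getD j []).getD (mN - 1 - (mN - (fuel + 1))) 0))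
        from pv_fold_set_suffix (fun j xv => xv - (PySem.Int.floordiv ((v.take (mN - (fuel + 1) + 1) ++ (List.range' (mN - (fuel + 1) + 1) (mN - (mN - (fuel + 1) + 1))).map (fun j => v.getD j 0 - pvFac (mN - (fuel + 1)) Am j * v.getD (mN - (fuel + 1)) 0)).getD (mN - 1 - (mN - (fuel + 1))) 0) (((Am.take (mN - (fuel + 1) + 1) ++ (Am.drop (mN - (fuel + 1) + 1)).map (fun row => row.take (mN - (fuel + 1)) ++ (List.range' (mN - (fuel + 1)) (mN - (mN - (fuel + 1)))).map (fun t => row.getD t 0 - PySem.Int.floordiv (row.getD (mN - (fuel + 1)) 0) ((Am.getD (mN - (fuel + 1)) []).getD (mN - (fuel + 1)) 0) * (Am.getD (mN - (fuel + 1)) []).getD t 0))).getD (mN - 1 - (mN - (fuel + 1))) []).getD (mN - 1 - (mN - (fuel + 1))) 0)) * (((Am.take (mN - (fuel + 1) + 1) ++ (Am.drop (mN - (fuel + 1) + 1)).map (fun row => row.take (mN - (fuel + 1)) ++ (List.range' (mN - (fuel + 1)) (mN - (mN - (fuel + 1)))).map (fun t => row.getD t 0 - PySem.Int.floordiv (row.getD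 (mN - (fuel + 1)) 0) ((Am.getD (mN - (fuel + 1)) []).getD (mN - (fuel + 1)) 0) * (Am.getD (mN - (fuel + 1)) []).getD t 0))).getD j []).getD (mN - 1 - (mN - (fuel + 1))) 0))
          (mN - (mN - (fuel + 1) + 1)) (mN - (fuel + 1) + 1) (v.take (mN - (fuel + 1) + 1) ++ (List.range' (mN - (fuel + 1) + 1) (mN - (mN - (fuel + 1) + 1))).map (fun j => v.getD j 0 - pvFac (mN - (fuel + 1)) Am j * v.getD (mN - (fuel + 1)) 0)) (by simp [hv]; omega)]
    rw [hbody]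
    have hL1 : ((Am.take (mN - (fuel + 1) + 1) ++ (Am.drop (mN - (fuel + 1) + 1)).map (fun row => row.take (mN - (fuel + 1)) ++ (List.range' (mN - (fuel + 1)) (mN - (mN - (fuel + 1)))).map (fun t => row.getD t 0 - PySem.Int.floordiv (row.getD (mN - (fuel + 1)) 0) ((Am.getD (mN - (fuel + 1)) []).getD (mN - (fuel + 1)) 0) * (Am.getD (mN - (fuel + 1)) []).getD t 0))) : List (List Int)).length = mN := by
      simp [hA]
      omega
    have hL2 : ∀ row ∈ ((Am.take (mN - (fuel + 1) + 1) ++ (Am.drop (mN - (fuel + 1) + 1)).map (fun row => row.take (mN - (fuel + 1)) ++ (List.range' (mN - (fuel + 1)) (mN - (mN - (fuel + 1)))).map (fun t => row.getD t 0 - PySem.Int.floordiv (row.getD (mN - (fuel + 1)) 0) ((Am.getD (mN - (fuel + 1)) []).getD (mN - (fuel + 1)) 0) * (Am.getD (mN - (fuel + 1)) []).getD t 0))) : List (List Int)), row.length = mN := by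
      intro row hrow
      rcases List.mem_append.mp hrow with h | h
      · exact hrows _ (List.mem_of_mem_take h)
      · obtain ⟨row0, h0, rfl⟩ := List.mem_map.mp h
        have hr0 := hrows _ (List.mem_of_mem_drop h0)
        simp [hr0]
    have hV1len : ((v.take (mN - (fuel + 1) + 1) ++ (List.range' (mN - (fuel + 1) + 1) (mN - (mN - (fuel + 1) + 1))).map (fun j => v.getD j 0 - pvFac (mN - (fuel + 1)) Am j * v.getD (mN - (fuel + 1)) 0)) : List Int).length = mN := by
      simp [hv]
      omega
    have hL3 : (((v.take (mN - (fuel + 1) + 1) ++ (List.range' (mN - (fuel + 1) + 1) (mN - (mN - (fuel + 1) + 1))).map (fun j => v.getD j 0 - pvFac (mN - (fuel + 1)) Am j * v.getD (mN - (fuel + 1)) 0)).take (mN - (fuel + 1) + 1) ++ (List.range' (mN - (fuel + 1) + 1) (mN - (mN - (fuel + 1) + 1))).map (fun j => (v.take (mN - (fuel + 1) + 1) ++ (List.range' (mN - (fuel + 1) + 1) (mN - (mN - (fuel + 1) + 1))).map (fun j => v.getD j 0 - pvFac (mN - (fuel + 1)) Am j * v.getD (mN - (fuel + 1)) 0)).getD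 j 0 - (PySem.Int.floordiv ((v.take (mN - (fuel + 1) + 1) ++ (List.range' (mN - (fuel + 1) + 1) (mN - (mN - (fuel + 1) + 1))).map (fun j => v.getD j 0 - pvFac (mN - (fuel + 1)) Am j * v.getD (mN - (fuel + 1)) 0)).getD (mN - 1 - (mN - (fuel + 1))) 0) (((Am.take (mN - (fuel + 1) + 1) ++ (Am.drop (mN - (fuel + 1) + 1)).map (fun row => row.take (mN - (fuel + 1)) ++ (List.range' (mN - (fuel + 1)) (mN - (mN - (fuel + 1)))).map (fun t => row.getD t 0 - PySem.Int.floordiv (row.getD (mN - (fuel + 1)) 0) ((Am.getD (mN - (fuel + 1)) []).getD (mN - (fuel + 1)) 0) * (Am.getD (mN - (fuel + 1)) []).getD t 0))).getD (mN - 1 - (mN - (fuel + 1))) []).getD (mN - 1 - (mN - (fuel + 1))) 0)) * ((Am.take (mN - (fuel + 1) + 1) ++ (Am.drop (mN - (fuel + 1) + 1)).map (fun row => row.take (mN - (fuel + 1)) ++ (List.range' (mN - (fuel + 1)) (mN - (mN - (fuel + 1)))).map (fun t => row.getD t 0 - PySem.Int.floordiv (row.getD (mN - (fuel + 1)) 0)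 ((Am.getD (mN - (fuel + 1)) []).getD (mN - (fuel + 1)) 0) * (Am.getD (mN - (fuel + 1)) []).getD t 0))).getD j []).getD (mN - 1 - (mN - (fuel + 1))) 0)) : List Int).length = mN := by
      simp
      omega
    rw [show List.range' (mN - (fuel + 1) + 1) fuel = List.range' (mN - fuel) fuel from by
      rw [show (mN - (fuel + 1) + 1) = mN - fuel from by omega]]
    rw [ih (Am.take (mN - (fuel + 1) + 1) ++ (Am.drop (mN - (fuel + 1) + 1)).map (fun row => row.take (mN - (fuel + 1)) ++ (List.range' (mN - (fuel + 1)) (mN - (mN - (fuel + 1)))).map (fun t => row.getD t 0 - PySem.Int.floordiv (row.getD (mN - (fuel + 1)) 0) ((Am.getD (mN - (fuel + 1)) []).getD (mN - (fuel + 1)) 0) * (Am.getD (mN - (fuel + 1)) []).getD t 0))) ((v.take (mN - (fuel + 1) + 1) ++ (List.range' (mN - (fuel + 1) + 1) (mN - (mN - (fuel + 1) + 1))).map (fun j => v.getD j 0 - pvFac (mN - (fuel + 1)) Am j * v.getD (mN - (fuel + 1)) 0)).take (mN - (fuel + 1) + 1) ++ (List.range' (mN - (fuel + 1) + 1) (mN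 - (mN - (fuel + 1) + 1))).map (fun j => (v.take (mN - (fuel + 1) + 1) ++ (List.range' (mN - (fuel + 1) + 1) (mN - (mN - (fuel + 1) + 1))).map (fun j => v.getD j 0 - pvFac (mN - (fuel + 1)) Am j * v.getD (mN - (fuel + 1)) 0)).getD j 0 - (PySem.Int.floordiv ((v.take (mN - (fuel + 1) + 1) ++ (List.range' (mN - (fuel + 1) + 1) (mN - (mN - (fuel + 1) + 1))).map (fun j => v.getD j 0 - pvFac (mN - (fuel + 1)) Am j * v.getD (mN - (fuel + 1)) 0)).getD (mN - 1 - (mN - (fuel + 1))) 0) (((Am.take (mN - (fuel + 1) + 1) ++ (Am.drop (mN - (fuel + 1) + 1)).map (fun row => row.take (mN - (fuel + 1)) ++ (List.range' (mN - (fuel + 1)) (mN - (mN - (fuel + 1)))).map (fun t => row.getD t 0 - PySem.Int.floordiv (row.getD (mN - (fuel + 1)) 0) ((Am.getD (mN - (fuel + 1)) []).getD (mN - (fuel + 1)) 0) * (Am.getD (mN - (fuel + 1)) []).getD t 0))).getD (mN - 1 - (mN - (fuel + 1))) []).getD (mN - 1 - (mN - (fuel + 1))) 0)) * ((Am.take (mN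 - (fuel + 1) + 1) ++ (Am.drop (mN - (fuel + 1) + 1)).map (fun row => row.take (mN - (fuel + 1)) ++ (List.range' (mN - (fuel + 1)) (mN - (mN - (fuel + 1)))).map (fun t => row.getD t 0 - PySem.Int.floordiv (row.getD (mN - (fuel + 1)) 0) ((Am.getD (mN - (fuel + 1)) []).getD (mN - (fuel + 1)) 0) * (Am.getD (mN - (fuel + 1)) []).getD t 0))).getD j []).getD (mN - 1 - (mN - (fuel + 1))) 0)) (co.set (mN - 1 - (mN - (fuel + 1))) (PySem.Int.floordiv ((v.take (mN - (fuel + 1) + 1) ++ (List.range' (mN - (fuel + 1) + 1) (mN - (mN - (fuel + 1) + 1))).map (fun j => v.getD j 0 - pvFac (mN - (fuel + 1)) Am j * v.getD (mN - (fuel + 1)) 0)).getD (mN - 1 - (mN - (fuel + 1))) 0) (((Am.take (mN - (fuel + 1) + 1) ++ (Am.drop (mN - (fuel + 1) + 1)).map (fun row => row.take (mN - (fuel + 1)) ++ (List.range' (mN - (fuel + 1)) (mN - (mN - (fuel + 1)))).map (fun t => row.getD t 0 - PySem.Int.floordiv (row.getD (mN - (fuel + 1)) 0) ((Am.getD (mN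 - (fuel + 1)) []).getD (mN - (fuel + 1)) 0) * (Am.getD (mN - (fuel + 1)) []).getD t 0))).getD (mN - 1 - (mN - (fuel + 1))) []).getD (mN - 1 - (mN - (fuel + 1))) 0))) (by omega) hL1 hL2 hL3]
    conv_rhs => rw [pvElim]
    rfl

-- ---- B's prepend-accumulator elimination = the set-based mirror ----

theorem pv_elimB_eq_elim (mN : Nat) :
    ∀ (fuel : Nat) (Am : List (List Int)) (v co : List Int), fuel ≤ mN → fuel ≤ co.length →
    (pvElim mN fuel (Am, v, co)).2.2 = pvElimB mN fuel (Am, v) (co.drop fuel) := by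
  intro fuel
  induction fuel with
  | zero =>
    intro Am v co _ _
    rw [pvElim, pvElimB, List.drop_zero]
  | succ fuel ih =>
    intro Am v co hf hco
    rw [pvElim, pvElimB]
    rw [show mN - 1 - (mN - (fuel + 1)) = fuel from by omega]
    rw [ih _ _ _ (by omega) (by simp; omega)]
    congr 1
    have hfl : fuel < co.length := by omega
    rw [List.drop_set, if_neg (by omega)]
    rw [List.drop_eq_getElem_cons hfl]
    rw [show fuel - fuel = 0 from by omega, List.set_cons_zero]

-- ---- lengths of the final coefficient list ----

theorem pv_elim_coeffs_length (mN : Nat) :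
    ∀ (fuel : Nat) (st : List (List Int) × List Int × List Int),
    (pvElim mN fuel st).2.2.length = st.2.2.length := by
  intro fuel
  induction fuel with
  | zero => intro st; rfl
  | succ fuel ih =>
    intro st
    obtain ⟨Am, v, co⟩ := st
    rw [pvElim, ih]
    simp

-- ---- final recombination ----

theorem pv_recomb_eq (mN : Nat) (cs : List Int) (h : cs.length = mN) (base : Int) :
    pvRecombA mN cs base = pvHorner cs base := by
  unfold pvRecombA
  rw [show (List.range mN).foldl (fun result i => result + cs.getD i 0 * base ^ i) 0
      = 0 + ((List.range mN).map (fun i => cs.getD i 0 * base ^ i)).sum from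
    pv_foldl_add (fun i => cs.getD i 0 * base ^ i) (List.range mN) 0]
  rw [← h, pv_sum_range_getD_eq_horner]
  ring

-- ---- the gauss phase, assembled ----

theorem pv_gauss_eq (mN : Nat) (Am : List (List Int)) (v : List Int)
    (hA : Am.length = mN) (hrows : ∀ row ∈ Am, row.length = mN) (hv : v.length = mN) :
    pvGaussA mN Am v = pvElim mN mN (Am, v, List.replicate mN (0 : Int)) := by
  show (List.range mN).foldl (pvGaussStep mN) (Am, v, List.replicate mN (0 : Int))
    = pvElim mN mN (Am, v, List.replicate mN (0 : Int))
  rw [List.range_eq_range',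
    show List.range' 0 mN = List.range' (mN - mN) mN from by rw [Nat.sub_self]]
  exact pv_gauss_loop mN mN Am v _ (le_refl mN) hA hrows hv

-- ---- top-level phase composition ----

-- for k ≤ -1 every range is empty and both mains return 0, whatever n is
theorem pv_mainA_zero (xs ys : List Char) (k n : Int) (hk : k ≤ -1) :
    pvMainA xs ys k n = 0 := by
  have h1 : k.toNat = 0 := by omega
  have h2 : (k + 1).toNat = 0 := by omega
  simp [pvMainA, h1, h2, pvGaussA, pvRecombA]

theorem pv_mainB_zero (xs ys : List Char) (k n : Int) (hk : k ≤ -1) :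
    pvMainB xs ys k n = 0 := by
  have h1 : k.toNat = 0 := by omega
  have h2 : (k + 1).toNat = 0 := by omega
  simp [pvMainB, h1, h2, pvElimB, pvHorner]

theorem pv_main_eq (xs ys : List Char) (k n : Int) (hk : 1 ≤ k) (hn : 0 ≤ n) :
    pvMainA xs ys k n = pvMainB xs ys k n := by
  obtain ⟨kn, rfl⟩ : ∃ kn : Nat, k = (kn : Int) :=
    ⟨k.toNat, (Int.toNat_of_nonneg (by omega)).symm⟩
  have hkn : 1 ≤ kn := by exact_mod_cast hk
  have hps : 0 ≤ PySem.Int.floordiv n (kn : Int) := by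
    rw [PySem.Int.floordiv_eq_ediv_of_pos (by exact_mod_cast hk)]
    exact Int.ediv_nonneg hn (by positivity)
  have htn1 : ((kn : Int)).toNat = kn := by omega
  have htn2 : (((kn : Int)) + 1).toNat = kn + 1 := by omega
  have htn3 : (2 * (kn : Int) - 1).toNat = 2 * kn - 1 := by omega
  simp only [pvMainA, pvMainB, htn1, htn2, htn3]
  rw [pv_parts_chunks _ kn _ hps, pv_parts_chunks _ kn _ hps]
  have hla := pv_chunks_length (PySem.Int.floordiv n (kn : Int)) kn (PySem.Chars.zfill xs n)
  have hlb := pv_chunks_length (PySem.Int.floordiv n (kn : Int)) kn (PySem.Chars.zfill ys n)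
  rw [pv_sample_eq (kn + 1) (2 * kn - 1) _ (pv_conv_length _ _ _ _)]
  rw [show (List.range (kn + 1)).map (fun (i : Nat) => pvHorner
      (pvConvA kn (2 * kn - 1)
        (pvChunks (PySem.Int.floordiv n (kn : Int)) kn (PySem.Chars.zfill xs n))
        (pvChunks (PySem.Int.floordiv n (kn : Int)) kn (PySem.Chars.zfill ys n))) (i : Int))
      = (List.range (kn + 1)).map (fun (i : Nat) => pvHorner
          (pvChunks (PySem.Int.floordiv n (kn : Int)) kn (PySem.Chars.zfill xs n)) (i : Int)
        * pvHorner
          (pvChunks (PySem.Int.floordiv n (kn : Int)) kn (PySem.Chars.zfill ys n)) (i : Int)) from by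
    apply List.map_congr_left
    intro i _
    exact pv_conv_horner kn hkn _ _ hla hlb (i : Int)]
  rw [← pv_vander_eq]
  rw [pv_gauss_eq (kn + 1) _ _
    (by simp [pv_vander_eq, pvVanderA])
    (by
      intro row hrow
      simp only [List.mem_map, List.mem_range] at hrow
      obtain ⟨i, _, rfl⟩ := hrow
      rw [pv_pows_eq]
      simp)
    (by simp)]
  rw [pv_recomb_eq (kn + 1) _ (by rw [pv_elim_coeffs_length]; simp)]
  rw [pv_elimB_eq_elim (kn + 1) (kn + 1) _ _ _ (le_refl _) (by simp)]
  rw [List.drop_replicate]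
  simp

-- the padding: A's 'if n % k: n += k - n % k' equals B's ceiling -(-n0 // k) * k
theorem pv_pad_eq (n0 k : Int) (hk : 1 ≤ k) :
    (if PySem.Int.mod n0 k ≠ 0 then n0 + (k - PySem.Int.mod n0 k) else n0)
      = -(PySem.Int.floordiv (-n0) k) * k := by
  have hfm := PySem.Int.floordiv_mul_add_mod n0 k
  have hm0 := PySem.Int.mod_nonneg n0 (by omega : (0:Int) < k)
  have hml := PySem.Int.mod_lt n0 (by omega : (0:Int) < k)
  split_ifs with h
  · have hMpos : 0 < PySem.Int.mod n0 k := lt_of_le_of_ne hm0 (Ne.symm h)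
    have hq : -PySem.Int.floordiv (-n0) k = PySem.Int.floordiv n0 k + 1 :=
      (PySem.Int.neg_floordiv_neg_eq_iff_of_pos (by omega)).mpr
        ⟨by nlinarith [hMpos, hml, hfm], by nlinarith [hMpos, hml, hfm]⟩
    rw [show -(PySem.Int.floordiv (-n0) k) = -PySem.Int.floordiv (-n0) k from rfl, hq]
    nlinarith [hfm]
  · have hM := not_not.mp h
    have hq : -PySem.Int.floordiv (-n0) k = PySem.Int.floordiv n0 k :=
      (PySem.Int.neg_floordiv_neg_eq_iff_of_pos (by omega)).mpr
        ⟨by nlinarith [hfm, hM], by nlinarith [hfm, hM]⟩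
    rw [show -(PySem.Int.floordiv (-n0) k) = -PySem.Int.floordiv (-n0) k from rfl, hq]
    nlinarith [hfm, hM]

-- ===== VERDICT (by name: the statement is the Claim_ definition above) =====
theorem toom_cook_recursive_spec : Claim_equal_toom_cook_recursive := by
  intro x y k _ hpre
  unfold Spec_toom_cook_recursive toom_cook_recursive toom_cook_recursive_alt
  by_cases hb : (PySem.Int.toChars x).length = 1 ∨ (PySem.Int.toChars y).length = 1
  · simp [hb]
  · have hk : k ≠ 0 := by
      rcases hpre with h | ⟨hk, _⟩
      · exact absurd h hb
      · exact hk
    simp only [hb, if_false]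
    rcases lt_or_gt_of_ne hk with hneg | hpos
    · rw [pv_mainA_zero _ _ _ _ (by omega), pv_mainB_zero _ _ _ _ (by omega)]
    · have hk1 : 1 ≤ k := by omega
      rw [pv_pad_eq _ _ hk1]
      apply pv_main_eq _ _ _ _ hk1
      have h3 : (0 : Int) ≤ max ((PySem.Int.toChars x).length : Int)
          ((PySem.Int.toChars y).length : Int) :=
        le_trans (Int.natCast_nonneg _) (le_max_left _ _)
      have hc := (PySem.Int.neg_floordiv_neg_eq_iff_of_pos
        (a := max ((PySem.Int.toChars x).length : Int) ((PySem.Int.toChars y).length : Int))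
        (b := k) (by omega)).mp rfl
      nlinarith [hc.2, h3]
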